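-- pv_equiv track=rewrite | github.com/FeritTasdildiren/iyisiniye | scraper/iyisiniye_scraper/spiders/google_maps_reviews.py | _captcha_tespit
-- ===== SOURCE A (Python) =====
-- def _captcha_tespit(body: str) -> bool:
--     """
--     Yanitda CAPTCHA olup olmadigini kontrol eder.
--
--     Args:
--         body: HTTP yanit govdesi
--
--     Returns:
--         True ise CAPTCHA tespit edildi
--     """
--     captcha_isaretleri = [
--         "captcha",
--         "unusual traffic",
--         "olagan disi trafik",
--         "robot degilim",
--         "not a robot",
--         "recaptcha",
--         "/sorry/",
--         "automated queries",
--     ]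
--
--     body_lower = body.lower()
--     return any(isaret in body_lower for isaret in captcha_isaretleri)
-- ===== SOURCE B (Python) =====
-- def _captcha_tespit(body: str) -> bool:
--     """Single case-insensitive scan over the body: at each position, test whether
--     any marker starts there (lowercasing only the chars compared), instead of
--     lowercasing the whole body and running 8 separate substring searches."""
--     markers = [
--         "captcha",
--         "unusual traffic",
--         "olagan disi trafik",
--         "robot degilim",
--         "not a robot",
--         "recaptcha",
--         "/sorry/",
--         "automated queries",
--     ]
--
--     def ci_prefix_at(m, s, i):
--         if i + len(m) > len(s):
--             return False
--         for k in range(len(m)):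
--             if s[i + k].lower() != m[k]:
--                 return False
--         return True
--
--     for i in range(len(body) + 1):
--         for m in markers:
--             if ci_prefix_at(m, body, i):
--                 return True
--     return False
-- ===== Notes on version B (the rewrite author's own statement) =====
-- stated objective: alternative
-- what changed: Instead of lowercasing the whole body and running eight independent substring searches, B makes a single scan over the body's positions and at each position checks case-insensitively (lowercasing only the characters compared) whether any marker starts there.
import Mathlib
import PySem

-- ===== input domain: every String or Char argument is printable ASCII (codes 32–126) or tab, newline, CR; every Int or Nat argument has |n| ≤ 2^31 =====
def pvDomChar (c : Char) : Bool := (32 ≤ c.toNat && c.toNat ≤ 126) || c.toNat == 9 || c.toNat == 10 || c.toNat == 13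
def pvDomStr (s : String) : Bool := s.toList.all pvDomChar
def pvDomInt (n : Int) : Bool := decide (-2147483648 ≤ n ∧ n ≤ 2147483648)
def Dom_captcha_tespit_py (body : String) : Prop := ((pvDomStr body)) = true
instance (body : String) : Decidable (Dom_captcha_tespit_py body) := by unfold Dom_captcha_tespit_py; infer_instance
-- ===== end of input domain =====

-- B changes the traversal, not the result: one case-insensitive scan over positions instead of
-- lowercasing the whole body and running 8 separate substring searches (objective: alternative).

-- ===== PORT A =====
-- the marker list of A (and B)
def pvMarkers : List String :=
  ["captcha", "unusual traffic", "olagan disi trafik", "robot degilim",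
   "not a robot", "recaptcha", "/sorry/", "automated queries"]

def captcha_tespit_py (body : String) : Bool :=
  let body_lower := PySem.Str.lower body
  pvMarkers.any (fun isaret => PySem.Str.isIn isaret body_lower)

-- ===== PORT B =====
-- ci_prefix_at: does marker m start at this suffix of the body, comparing char by char,
-- lowercasing only the body char being compared (B's inner loop over k)?
def pvCiPrefix : List Char → List Char → Bool
  | [], _ => true
  | _ :: _, [] => false
  | c :: m, d :: s => (PySem.Chars.lowerChar d == c) && pvCiPrefix m s

-- B's outer loop over positions i = 0..len(body): recursion over the suffixes of the body
def pvScan : List Char → Bool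
  | [] => pvMarkers.any (fun m => pvCiPrefix m.toList [])
  | d :: s => pvMarkers.any (fun m => pvCiPrefix m.toList (d :: s)) || pvScan s

def captcha_tespit_py_alt (body : String) : Bool := pvScan body.toList

-- ===== PRECONDITION & SPEC =====
def Spec_captcha_tespit_py (body : String) (out : Bool) : Prop := out = captcha_tespit_py_alt body
instance (body : String) (out : Bool) : Decidable (Spec_captcha_tespit_py body out) := by unfold Spec_captcha_tespit_py; infer_instance

-- ===== CLAIM (what is proved, stated in full; the proofs are below) =====
def Claim_equal_captcha_tespit_py : Prop := ∀ (body : String), Dom_captcha_tespit_py body → Spec_captcha_tespit_py body (captcha_tespit_py body)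

-- ===== LEMMAS AND PROOFS =====

-- B's inner loop checks exactly "m is a prefix of the lowercased suffix"
theorem pvCiPrefix_iff (m s : List Char) :
    pvCiPrefix m s = true ↔ m <+: s.map PySem.Chars.lowerChar := by
  induction m generalizing s with
  | nil => simp [pvCiPrefix]
  | cons c m ih =>
    cases s with
    | nil => simp [pvCiPrefix]
    | cons d s =>
      simp only [pvCiPrefix, List.map_cons, Bool.and_eq_true, beq_iff_eq,
        List.cons_prefix_cons, ih]
      exact and_congr_left fun _ => eq_comm

-- B's outer loop finds exactly "some marker is an infix of the lowercased body"
theorem pvScan_iff (s : List Char) :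
    pvScan s = true ↔ ∃ m ∈ pvMarkers, m.toList <:+: s.map PySem.Chars.lowerChar := by
  induction s with
  | nil =>
    simp only [pvScan, List.any_eq_true, pvCiPrefix_iff, List.map_nil,
      List.prefix_nil, List.infix_nil]
  | cons d s ih =>
    simp only [pvScan, Bool.or_eq_true, List.any_eq_true, pvCiPrefix_iff, ih, List.map_cons]
    constructor
    · rintro (⟨m, hm, hp⟩ | ⟨m, hm, hi⟩)
      · exact ⟨m, hm, hp.isInfix⟩
      · exact ⟨m, hm, hi.trans (List.suffix_cons _ _).isInfix⟩
    · rintro ⟨m, hm, hi⟩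
      rcases List.infix_cons_iff.mp hi with hp | hi
      · exact Or.inl ⟨m, hm, hp⟩
      · exact Or.inr ⟨m, hm, hi⟩

-- ===== VERDICT (by name: the statement is the Claim_ definition above) =====
theorem captcha_tespit_py_spec : Claim_equal_captcha_tespit_py := by
  intro body _
  unfold Spec_captcha_tespit_py captcha_tespit_py captcha_tespit_py_alt
  rw [Bool.eq_iff_iff, pvScan_iff]
  simp only [List.any_eq_true, PySem.Str.isIn_iff_infix, PySem.Str.toList_lower, PySem.Chars.lower]
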